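-- pv_equiv track=rewrite | github.com/Rijo756/Cell-Tracking-using-flow | models/tracking_methods.py | track_cellstart
-- ===== SOURCE A (Python) =====
-- def track_cellstart(cell, track_cell_details):
--     '''
--     recursive function till start to find cell lineage
--     '''
--     if cell in track_cell_details['Parent'].keys():
--         parent_cell = track_cell_details['Parent'][cell]
--         if parent_cell in track_cell_details['New'].keys():
--             return track_cellstart(parent_cell, track_cell_details)
--         else:
--             return -1
--     else:
--         return track_cell_details['New'][cell]
-- ===== SOURCE B (Python) =====
-- def track_cellstart(cell, track_cell_details):
--     '''
--     iterative walk along the parent chain to find the cell lineage start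
--     '''
--     parent = track_cell_details['Parent']
--     new = track_cell_details['New']
--     current = cell
--     while current in parent:
--         nxt = parent[current]
--         if nxt not in new:
--             return -1
--         current = nxt
--     return new[current]
-- ===== Notes on version B (the rewrite author's own statement) =====
-- stated objective: alternative
-- what changed: the tail recursion is replaced by an explicit while-loop that advances a 'current' cell along the parent chain, with the dicts looked up once instead of on every call
import Mathlib
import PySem

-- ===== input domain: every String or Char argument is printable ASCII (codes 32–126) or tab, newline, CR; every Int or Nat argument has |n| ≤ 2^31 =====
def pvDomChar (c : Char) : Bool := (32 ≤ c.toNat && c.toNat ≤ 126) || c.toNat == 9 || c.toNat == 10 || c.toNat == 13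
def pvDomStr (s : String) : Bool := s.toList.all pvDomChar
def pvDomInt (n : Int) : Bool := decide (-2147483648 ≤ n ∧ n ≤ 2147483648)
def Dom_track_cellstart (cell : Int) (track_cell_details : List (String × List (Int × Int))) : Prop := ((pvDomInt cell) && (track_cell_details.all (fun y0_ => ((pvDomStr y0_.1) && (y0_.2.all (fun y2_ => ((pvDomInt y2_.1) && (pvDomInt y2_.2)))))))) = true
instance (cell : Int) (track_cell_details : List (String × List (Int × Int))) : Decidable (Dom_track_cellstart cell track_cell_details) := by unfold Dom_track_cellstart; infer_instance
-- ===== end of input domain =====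

-- B replaces A's tail recursion by an explicit while-loop over a 'current' cell (alternative decomposition, same cost).

-- ===== PORT A =====
-- A's recursion; the fuel argument only makes the recursion total (A diverges on parent cycles,
-- which Pre_ excludes); 0 at fuel exhaustion is never reached under Pre_.
def goA (P N : List (Int × Int)) : Nat → Int → Int
  | 0, _ => 0
  | fuel + 1, cell =>
    if (PySem.Dict.mk P).contains cell then
      let parent_cell := (PySem.Dict.mk P).getD cell 0
      if (PySem.Dict.mk N).contains parent_cell then goA P N fuel parent_cell
      else -1
    else (PySem.Dict.mk N).getD cell 0

def track_cellstart (cell : Int) (track_cell_details : List (String × List (Int × Int))) : Int :=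
  let P := (PySem.Dict.mk track_cell_details).getD "Parent" []
  let N := (PySem.Dict.mk track_cell_details).getD "New" []
  goA P N (P.length + 1) cell

-- ===== PORT B =====
-- one body of B's while-loop: Sum.inl = still walking (current cell), Sum.inr = returned value
def stepB (P N : List (Int × Int)) (st : Sum Int Int) : Sum Int Int :=
  match st with
  | .inr r => .inr r
  | .inl current =>
    if (PySem.Dict.mk P).contains current then
      let nxt := (PySem.Dict.mk P).getD current 0
      if (PySem.Dict.mk N).contains nxt then .inl nxt else .inr (-1)
    else .inr ((PySem.Dict.mk N).getD current 0)

-- the while-loop is run as a bounded fold (P.length+1 iterations always suffice under Pre_;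
-- B's Python loop diverges exactly where A's recursion does, outside Pre_)
def track_cellstart_alt (cell : Int) (track_cell_details : List (String × List (Int × Int))) : Int :=
  let P := (PySem.Dict.mk track_cell_details).getD "Parent" []
  let N := (PySem.Dict.mk track_cell_details).getD "New" []
  match (List.range (P.length + 1)).foldl (fun st _ => stepB P N st) (Sum.inl cell) with
  | .inr r => r
  | .inl current => (PySem.Dict.mk N).getD current 0

-- ===== PRECONDITION & SPEC =====
-- chain step on cells: stay put once terminal (terminal = not in Parent, or parent not in New)
def chainDone (P N : List (Int × Int)) (c : Int) : Bool :=
  !((PySem.Dict.mk P).contains c && (PySem.Dict.mk N).contains ((PySem.Dict.mk P).getD c 0))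

def chainStep (P N : List (Int × Int)) (c : Int) : Int :=
  if chainDone P N c then c else (PySem.Dict.mk P).getD c 0

-- Pre_ excludes exactly the inputs where Python raises or diverges: missing 'Parent'/'New' keys
-- (KeyError), a never-terminating parent cycle from cell (infinite recursion), and a starting cell
-- in neither dict (KeyError on New[cell]); a terminating chain visits distinct Parent keys, so it
-- terminates within P.length steps and the bound excludes nothing else.
def Pre_track_cellstart (cell : Int) (track_cell_details : List (String × List (Int × Int))) : Prop :=
  (PySem.Dict.mk track_cell_details).contains "Parent" = true ∧
  (PySem.Dict.mk track_cell_details).contains "New" = true ∧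
  (let P := (PySem.Dict.mk track_cell_details).getD "Parent" []
   let N := (PySem.Dict.mk track_cell_details).getD "New" []
   ((PySem.Dict.mk P).contains cell = false → (PySem.Dict.mk N).contains cell = true) ∧
   ∃ n, n ≤ P.length ∧ chainDone P N ((chainStep P N)^[n] cell) = true)

instance (cell : Int) (track_cell_details : List (String × List (Int × Int))) : Decidable (Pre_track_cellstart cell track_cell_details) := by unfold Pre_track_cellstart; infer_instance

def pvWitness_track_cellstart : Int × (List (String × List (Int × Int))) :=
  (1, [("Parent", [(1, 2)]), ("New", [(2, 5), (1, 1)])])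

def Spec_track_cellstart (cell : Int) (track_cell_details : List (String × List (Int × Int))) (out : Int) : Prop := out = track_cellstart_alt cell track_cell_details
instance (cell : Int) (track_cell_details : List (String × List (Int × Int))) (out : Int) : Decidable (Spec_track_cellstart cell track_cell_details out) := by unfold Spec_track_cellstart; infer_instance

-- ===== CLAIM (what is proved, stated in full; the proofs are below) =====
def Claim_equal_track_cellstart : Prop := ∀ (cell : Int) (track_cell_details : List (String × List (Int × Int))), Dom_track_cellstart cell track_cell_details → Pre_track_cellstart cell track_cell_details → Spec_track_cellstart cell track_cell_details (track_cellstart cell track_cell_details)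

-- ===== LEMMAS AND PROOFS =====

-- a fold whose body ignores the list element is an iterate of its length
theorem foldl_ignore_eq_iterate {α β : Type} (f : α → α) (l : List β) (st : α) :
    l.foldl (fun s _ => f s) st = f^[l.length] st := by
  induction l generalizing st with
  | nil => rfl
  | cons a l ih => simp [List.foldl_cons, ih, Function.iterate_succ_apply]

-- once B's loop has returned, further iterations do nothing
theorem stepB_iterate_inr (P N : List (Int × Int)) (n : Nat) (r : Int) :
    (stepB P N)^[n] (Sum.inr r) = Sum.inr r :=
  Function.iterate_fixed rfl n

-- key invariant: if the chain from c terminates within fuel steps, B's loop state after fuel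
-- iterations is the returned value and it equals A's recursion with the same fuel
theorem iterate_stepB_eq_goA (P N : List (Int × Int)) :
    ∀ (fuel : Nat) (c : Int), (∃ n, n < fuel ∧ chainDone P N ((chainStep P N)^[n] c) = true) →
      (stepB P N)^[fuel] (Sum.inl c) = Sum.inr (goA P N fuel c) := by
  intro fuel
  induction fuel with
  | zero => intro c ⟨n, hn, _⟩; omega
  | succ fuel ih =>
    intro c h
    rw [Function.iterate_succ_apply]
    by_cases hP : (PySem.Dict.mk P).contains c
    · by_cases hN : (PySem.Dict.mk N).contains ((PySem.Dict.mk P).getD c 0)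
      · have hnd : chainDone P N c = false := by simp [chainDone, hP, hN]
        have hstep : stepB P N (Sum.inl c) = Sum.inl ((PySem.Dict.mk P).getD c 0) := by
          simp [stepB, hP, hN]
        rw [hstep]
        have hrec : ∃ n, n < fuel ∧
            chainDone P N ((chainStep P N)^[n] ((PySem.Dict.mk P).getD c 0)) = true := by
          obtain ⟨n, hn, hd⟩ := h
          cases n with
          | zero => simp at hd; rw [hd] at hnd; cases hnd
          | succ m =>
            refine ⟨m, by omega, ?_⟩
            rw [Function.iterate_succ_apply] at hd
            rwa [show chainStep P N c = (PySem.Dict.mk P).getD c 0 by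
              simp [chainStep, hnd]] at hd
        rw [ih _ hrec]
        simp [goA, hP, hN]
      · have hstep : stepB P N (Sum.inl c) = Sum.inr (-1) := by
          simp [stepB, hP, hN]
        rw [hstep, stepB_iterate_inr]
        simp [goA, hP, hN]
    · have hstep : stepB P N (Sum.inl c) = Sum.inr ((PySem.Dict.mk N).getD c 0) := by
        simp [stepB, hP]
      rw [hstep, stepB_iterate_inr]
      simp [goA, hP]

-- ===== VERDICT (by name: the statement is the Claim_ definition above) =====
theorem track_cellstart_spec : Claim_equal_track_cellstart := by
  intro cell d _ hpre
  obtain ⟨_, _, _, n, hn, hd⟩ := hpre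
  simp only [Spec_track_cellstart, track_cellstart, track_cellstart_alt]
  rw [foldl_ignore_eq_iterate, List.length_range,
    iterate_stepB_eq_goA _ _ _ _ ⟨n, by omega, hd⟩]
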